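-- pv_equiv track=rewrite | github.com/songye38/2023_algorithm_study | 프로그래머스/1/17681. ［1차］ 비밀지도/［1차］ 비밀지도.py | solution
-- ===== SOURCE A (Python) =====
-- def hex_to_num(num,length):
--     result = ""
--     remainder = 0
--     while num!=0:
--         num, remainder = divmod(num,2)
--         result += str(remainder)
--     result = result[::-1]
--     if len(result)!=length:
--         result = "0" * (length - len(result)) + result
--     return result
--
-- def solution(n, arr1, arr2):
--     map = []
--     answer = []
--     for i in range(n):
--         map.append([hex_to_num(arr1[i],n),hex_to_num(arr2[i],n)])
--
--     for row in map:
--         temp = ""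
--         for i in range(n):
--             if row[0][i] =='0' and row[1][i]=='0':
--                 temp += " "
--             else:
--                 temp +='#'
--         answer.append(temp)
--     return answer
-- ===== SOURCE B (Python) =====
-- def solution(n, arr1, arr2):
--     answer = []
--     for i in range(n):
--         v = arr1[i] | arr2[i]
--         answer.append("".join("#" if (v >> j) & 1 else " " for j in range(n - 1, -1, -1)))
--     return answer
-- ===== Notes on version B (the rewrite author's own statement) =====
-- stated objective: idiomatic
-- what changed: B drops the hex_to_num helper and the two MSB-first binary strings entirely: it ORs the two row integers and renders each character by a direct bit test (v >> j) & 1, instead of building, reversing and zero-padding two digit strings and comparing their characters.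
-- outside the precondition, e.g. on solution(2, [4, 0], [0, 0]): A returns ['# ', '  '], B returns ['  ', '  ']
import Mathlib
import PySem

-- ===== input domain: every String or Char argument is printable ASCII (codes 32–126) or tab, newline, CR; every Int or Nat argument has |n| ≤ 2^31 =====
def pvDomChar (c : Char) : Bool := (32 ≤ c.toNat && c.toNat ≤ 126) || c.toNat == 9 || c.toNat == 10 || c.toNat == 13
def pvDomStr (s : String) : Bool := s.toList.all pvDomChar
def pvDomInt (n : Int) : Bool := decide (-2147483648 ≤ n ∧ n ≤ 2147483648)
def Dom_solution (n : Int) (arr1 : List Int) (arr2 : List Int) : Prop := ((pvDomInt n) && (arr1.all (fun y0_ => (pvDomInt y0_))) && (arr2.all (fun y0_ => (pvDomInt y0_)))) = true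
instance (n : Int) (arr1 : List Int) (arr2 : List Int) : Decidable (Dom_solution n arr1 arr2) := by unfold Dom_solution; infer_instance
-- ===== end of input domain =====

-- B replaces A's binary-string construction (hex_to_num) by an integer OR of the two rows
-- and a direct per-bit test; same result, more idiomatic.


-- ===== PORT A =====
-- Python strings are carried as List Char (PySem convention) and packed with String.ofList
-- only where A stores them into the answer list.
-- 'while num != 0: num, remainder = divmod(num, 2); result += str(remainder)'
-- (fuel num.natAbs + 1 suffices for every num ≥ 0; on num < 0 Python loops forever,
-- which Pre_solution excludes).
def pvHexLoop : Nat → Int → List Char → List Char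
  | 0, _, res => res
  | fuel+1, num, res =>
    if num = 0 then res
    else pvHexLoop fuel (PySem.Int.floordiv num 2)
           (res ++ PySem.Int.toChars (PySem.Int.mod num 2))

def hex_to_num (num length : Int) : List Char :=
  let result := pvHexLoop (num.natAbs + 1) num []
  let result := result.reverse
  if (result.length : Int) ≠ length then
    List.replicate (length - (result.length : Int)).toNat '0' ++ result
  else result

def solution (n : Int) (arr1 : List Int) (arr2 : List Int) : List String :=
  let mp := (PySem.List.pyRange 0 n 1).foldl (fun m i =>
    m ++ [(hex_to_num (PySem.List.pyGetD arr1 i 0) n,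
           hex_to_num (PySem.List.pyGetD arr2 i 0) n)]) []
  mp.foldl (fun answer row =>
    let temp := (PySem.List.pyRange 0 n 1).foldl (fun t i =>
      if PySem.List.pyGetD row.1 i ' ' = '0' ∧ PySem.List.pyGetD row.2 i ' ' = '0'
      then t ++ [' '] else t ++ ['#']) []
    answer ++ [String.ofList temp]) []

-- ===== PORT B =====
def solution_alt (n : Int) (arr1 : List Int) (arr2 : List Int) : List String :=
  (PySem.List.pyRange 0 n 1).foldl (fun answer i =>
    let v := PySem.Int.bor (PySem.List.pyGetD arr1 i 0) (PySem.List.pyGetD arr2 i 0)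
    answer ++ [String.ofList ((PySem.List.pyRange (n-1) (-1) (-1)).map (fun j =>
      if PySem.Int.band (v >>> j.toNat) 1 ≠ 0 then '#' else ' '))]) []

-- ===== PRECONDITION & SPEC =====
-- Pre_ excludes: rows shorter than n (A raises IndexError), negative row values (A's
-- while-loop never terminates), and row values ≥ 2^n (A returns a value there, but it is
-- an accidental one — hex_to_num is not truncated, so A reads the HIGH n bits of the
-- value while B reads the low n bits; outside the puzzle's documented domain neither
-- reading is specified).
def Pre_solution (n : Int) (arr1 : List Int) (arr2 : List Int) : Prop :=
  n ≤ (arr1.length : Int) ∧ n ≤ (arr2.length : Int) ∧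
  (∀ x ∈ arr1.take n.toNat, 0 ≤ x ∧ x < 2 ^ n.toNat) ∧
  (∀ x ∈ arr2.take n.toNat, 0 ≤ x ∧ x < 2 ^ n.toNat)
instance (n : Int) (arr1 : List Int) (arr2 : List Int) : Decidable (Pre_solution n arr1 arr2) := by
  unfold Pre_solution; infer_instance

def pvWitness_solution : Int × List Int × List Int := (2, [1, 3], [2, 0])

def Spec_solution (n : Int) (arr1 : List Int) (arr2 : List Int) (out : List String) : Prop :=
  out = solution_alt n arr1 arr2
instance (n : Int) (arr1 : List Int) (arr2 : List Int) (out : List String) :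
    Decidable (Spec_solution n arr1 arr2 out) := by unfold Spec_solution; infer_instance

-- ===== CLAIM (what is proved, stated in full; the proofs are below) =====
def Claim_equal_solution : Prop := ∀ (n : Int) (arr1 : List Int) (arr2 : List Int),
  Dom_solution n arr1 arr2 → Pre_solution n arr1 arr2 →
  Spec_solution n arr1 arr2 (solution n arr1 arr2)

-- ===== LEMMAS AND PROOFS =====

-- LSB-first binary digits of m, without leading zeros (what A's while-loop appends).
def pvLsb (m : Nat) : List Char :=
  if h : m = 0 then [] else (if m % 2 = 1 then '1' else '0') :: pvLsb (m / 2)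
decreasing_by exact Nat.div_lt_self (Nat.pos_of_ne_zero h) (by omega)

-- LSB-first binary digits of m, padded to exactly L digits.
def pvBitsFix : Nat → Nat → List Char
  | 0, _ => []
  | L+1, m => (if m % 2 = 1 then '1' else '0') :: pvBitsFix L (m / 2)

theorem pvBitsFix_length (L m : Nat) : (pvBitsFix L m).length = L := by
  induction L generalizing m with
  | zero => rfl
  | succ L ih => simp [pvBitsFix, ih]

theorem pvBitsFix_getElem (L m j : Nat) (hj : j < L) :
    (pvBitsFix L m)[j]'(by rw [pvBitsFix_length]; exact hj)
      = if m.testBit j then '1' else '0' := by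
  induction L generalizing m j with
  | zero => omega
  | succ L ih =>
    cases j with
    | zero => simp [pvBitsFix, Nat.testBit_zero]
    | succ j => simpa [pvBitsFix, Nat.testBit_succ] using ih (m / 2) j (by omega)

theorem pvBitsFix_zero (L : Nat) : pvBitsFix L 0 = List.replicate L '0' := by
  induction L with
  | zero => rfl
  | succ L ih => simp [pvBitsFix, ih, List.replicate_succ]

theorem pvLsb_pad (L m : Nat) (hm : m < 2 ^ L) :
    pvLsb m ++ List.replicate (L - (pvLsb m).length) '0' = pvBitsFix L m := by
  induction L generalizing m with
  | zero =>
    interval_cases m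
    simp [pvLsb, pvBitsFix]
  | succ L ih =>
    by_cases h : m = 0
    · subst h; simp [pvLsb, pvBitsFix_zero]
    · rw [pvLsb, dif_neg h]
      have hm2 : m / 2 < 2 ^ L := by
        rw [pow_succ] at hm; omega
      simpa [pvBitsFix, List.replicate, Nat.succ_sub_succ] using ih (m / 2) hm2

theorem pvLsb_length_le (L m : Nat) (hm : m < 2 ^ L) : (pvLsb m).length ≤ L := by
  have := congrArg List.length (pvLsb_pad L m hm)
  simp [pvBitsFix_length] at this
  omega

theorem pvHexLoop_eq (m : Nat) : ∀ (fuel : Nat) (res : List Char), m < fuel →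
    pvHexLoop fuel (m : Int) res = res ++ pvLsb m := by
  induction m using Nat.strong_induction_on with
  | _ m ih =>
    intro fuel res hf
    match fuel with
    | 0 => omega
    | fuel + 1 =>
      by_cases h : m = 0
      · subst h; simp [pvHexLoop, pvLsb]
      · rw [pvHexLoop]
        rw [if_neg (by exact_mod_cast h)]
        have hdiv : PySem.Int.floordiv (m : Int) 2 = ((m / 2 : Nat) : Int) := by
          exact_mod_cast PySem.Int.floordiv_natCast m 2
        have hmod : PySem.Int.mod (m : Int) 2 = ((m % 2 : Nat) : Int) := by
          exact_mod_cast PySem.Int.mod_natCast m 2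
        rw [hdiv, hmod]
        have hlt : m / 2 < m := Nat.div_lt_self (Nat.pos_of_ne_zero h) (by omega)
        rw [ih (m / 2) hlt fuel _ (by omega)]
        have hch : PySem.Int.toChars ((m % 2 : Nat) : Int) = [if m % 2 = 1 then '1' else '0'] := by
          rcases Nat.mod_two_eq_zero_or_one m with h2 | h2 <;> rw [h2] <;> decide
        rw [hch]
        conv_rhs => rw [pvLsb, dif_neg h]
        simp

-- hex_to_num m L is the MSB-first fixed-width-L binary rendering of m, for m < 2^L.
theorem pvHex_spec (L m : Nat) (hm : m < 2 ^ L) :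
    hex_to_num (m : Int) (L : Int) = (pvBitsFix L m).reverse := by
  unfold hex_to_num
  rw [show ((m : Int).natAbs + 1) = m + 1 by simp]
  rw [pvHexLoop_eq m (m + 1) [] (by omega)]
  rw [List.nil_append]
  have hlen := pvLsb_length_le L m hm
  have hpad := pvLsb_pad L m hm
  by_cases hL : (pvLsb m).length = L
  · rw [if_neg (by simp [hL])]
    rw [← hpad, hL]
    simp
  · rw [if_pos (by simp [hL])]
    rw [← hpad, List.reverse_append, List.reverse_replicate]
    congr 1
    simp

-- one cell: A's two-character test equals B's single bit test on the OR.
theorem pvCell_eq (L k ma mb : Nat) (hk : k < L) :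
    (if ((pvBitsFix L ma).reverse.getD k ' ' = '0' ∧ (pvBitsFix L mb).reverse.getD k ' ' = '0')
     then ' ' else '#')
    = (if PySem.Int.band ((PySem.Int.bor (ma : Int) (mb : Int)) >>> ((L - 1 - k : Nat) : Int)) 1 ≠ 0
       then '#' else ' ') := by
  have hchar : ∀ m : Nat, (pvBitsFix L m).reverse.getD k ' '
      = if m.testBit (L - 1 - k) then '1' else '0' := by
    intro m
    rw [List.getD_eq_getElem _ _ (by simp [pvBitsFix_length]; exact hk)]
    rw [List.getElem_reverse]
    rw [pvBitsFix_getElem L m _ (by simp [pvBitsFix_length]; omega)]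
    congr 2
    simp [pvBitsFix_length]
  rw [hchar ma, hchar mb]
  have hbor : PySem.Int.bor (ma : Int) (mb : Int) = ((ma ||| mb : Nat) : Int) :=
    PySem.Int.bor_natCast ma mb
  rw [hbor]
  have hshift : (((ma ||| mb : Nat) : Int) >>> ((L - 1 - k : Nat) : Int) : Int)
      = (((ma ||| mb) >>> (L - 1 - k) : Nat) : Int) := Int.shiftRight_natCast _ _
  rw [hshift]
  have hband : PySem.Int.band (((ma ||| mb) >>> (L - 1 - k) : Nat) : Int) 1
      = ((((ma ||| mb) >>> (L - 1 - k)) &&& 1 : Nat) : Int) := by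
    exact_mod_cast PySem.Int.band_natCast _ 1
  rw [hband]
  have htest : (ma ||| mb).testBit (L - 1 - k) = (ma.testBit (L - 1 - k) || mb.testBit (L - 1 - k)) :=
    Nat.testBit_lor ..
  have hb1 : ((ma ||| mb) >>> (L - 1 - k)) &&& 1 = if (ma ||| mb).testBit (L - 1 - k) then 1 else 0 := by
    rcases h : (ma ||| mb).testBit (L - 1 - k) <;>
      simp [Nat.testBit, Nat.and_one_is_mod] at h ⊢ <;> omega
  rw [hb1, htest]
  rcases ha : ma.testBit (L - 1 - k) <;> rcases hb : mb.testBit (L - 1 - k) <;> simp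

-- ===== VERDICT (by name: the statement is the Claim_ definition above) =====
theorem solution_spec : Claim_equal_solution := by
  intro n arr1 arr2 _hdom hpre
  obtain ⟨h1, h2, hv1, hv2⟩ := hpre
  unfold Spec_solution solution solution_alt
  rw [PySem.List.foldl_append_singleton_eq_map, List.nil_append]
  rw [PySem.List.foldl_append_singleton_eq_map, List.nil_append]
  rw [PySem.List.foldl_append_singleton_eq_map, List.nil_append, List.map_map]
  apply List.map_congr_left
  intro i hi
  rw [PySem.List.mem_pyRange_one] at hi
  obtain ⟨hi0, hin⟩ := hi
  -- n > 0 here; write n = ↑L, i = ↑knat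
  obtain ⟨L, hL⟩ : ∃ L : Nat, n = (L : Int) := ⟨n.toNat, by omega⟩
  subst hL
  -- the two row values and their bounds
  have hi1 : i.toNat < arr1.length := by omega
  have hi2 : i.toNat < arr2.length := by omega
  have hga : PySem.List.pyGetD arr1 i 0 = arr1[i.toNat] :=
    PySem.List.pyGetD_eq_getElem arr1 0 hi0 (by omega)
  have hgb : PySem.List.pyGetD arr2 i 0 = arr2[i.toNat] :=
    PySem.List.pyGetD_eq_getElem arr2 0 hi0 (by omega)
  simp only [Int.toNat_natCast] at hv1 hv2
  have hma : 0 ≤ arr1[i.toNat] ∧ arr1[i.toNat] < 2 ^ L := by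
    apply hv1
    have hlt : i.toNat < (arr1.take L).length := by rw [List.length_take]; omega
    have hmem := List.getElem_mem hlt
    rwa [List.getElem_take] at hmem
  have hmb : 0 ≤ arr2[i.toNat] ∧ arr2[i.toNat] < 2 ^ L := by
    apply hv2
    have hlt : i.toNat < (arr2.take L).length := by rw [List.length_take]; omega
    have hmem := List.getElem_mem hlt
    rwa [List.getElem_take] at hmem
  simp only [Function.comp]
  simp only [hga, hgb]
  obtain ⟨ma, hmaeq⟩ : ∃ m : Nat, arr1[i.toNat] = (m : Int) := ⟨arr1[i.toNat].toNat, by omega⟩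
  obtain ⟨mb, hmbeq⟩ : ∃ m : Nat, arr2[i.toNat] = (m : Int) := ⟨arr2[i.toNat].toNat, by omega⟩
  simp only [hmaeq, hmbeq]
  have hmaL : ma < 2 ^ L := by
    have := hma.2; rw [hmaeq] at this; exact_mod_cast this
  have hmbL : mb < 2 ^ L := by
    have := hmb.2; rw [hmbeq] at this; exact_mod_cast this
  -- inner loops to maps
  congr 1
  -- A's inner foldl: push the branch into the appended singleton, then fold → map
  have hbody : (fun (t : List Char) (j : Int) =>
      if PySem.List.pyGetD (hex_to_num (ma : Int) (L : Int)) j ' ' = '0' ∧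
         PySem.List.pyGetD (hex_to_num (mb : Int) (L : Int)) j ' ' = '0'
      then t ++ [' '] else t ++ ['#'])
      = (fun (t : List Char) (j : Int) => t ++
        [if PySem.List.pyGetD (hex_to_num (ma : Int) (L : Int)) j ' ' = '0' ∧
            PySem.List.pyGetD (hex_to_num (mb : Int) (L : Int)) j ' ' = '0'
         then ' ' else '#']) := by
    funext t j; split <;> rfl
  rw [hbody, PySem.List.foldl_append_singleton_eq_map, List.nil_append]
  -- both index lists become List.range L
  rw [PySem.List.pyRange_one 0 (L : Int), PySem.List.pyRange_neg_one ((L : Int) - 1) (-1)]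
  rw [show ((L : Int) - 0).toNat = L by omega, show ((L : Int) - 1 - (-1)).toNat = L by omega]
  rw [List.map_map, List.map_map]
  apply List.map_congr_left
  intro k hk
  rw [List.mem_range] at hk
  simp only [Function.comp]
  rw [pvHex_spec L ma hmaL, pvHex_spec L mb hmbL]
  have hidx : ∀ m : Nat, PySem.List.pyGetD (pvBitsFix L m).reverse (0 + (k : Int)) ' '
      = (pvBitsFix L m).reverse.getD k ' ' := by
    intro m
    rw [show (0 + (k : Int)) = (k : Int) by omega]
    exact PySem.List.pyGetD_natCast _ _ _
  rw [hidx, hidx]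
  have hj : ((L : Int) - 1 - (k : Int)).toNat = L - 1 - k := by omega
  rw [hj]
  exact pvCell_eq L k ma mb hk
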